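-- pv_equiv track=rewrite | github.com/gucorpling/amalgum | nlp_controller.py | escape_treetagger
-- ===== SOURCE A (Python) =====
-- def escape_treetagger(tt_sgml):
--     new_lines = []
--     for line in tt_sgml.split("\n"):
--         # probably an element
--         if line.startswith("<") and line.endswith(">"):
--             new_lines.append(line)
--         else:
--             new_lines.append(
--                 line.replace("&", "&amp;")
--                 .replace("<", "&lt;")
--                 .replace(">", "&gt;")
--                 .replace('"', "&quot;")
--                 .replace("'", "&apos;")
--             )
--     return "\n".join(new_lines)
-- ===== SOURCE B (Python) =====
-- _ESCAPES = {"&": "&amp;", "<": "&lt;", ">": "&gt;", '"': "&quot;", "'": "&apos;"}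
--
-- def escape_treetagger(tt_sgml):
--     return "\n".join(
--         line if (line.startswith("<") and line.endswith(">"))
--         else "".join(_ESCAPES.get(ch, ch) for ch in line)
--         for line in tt_sgml.split("\n")
--     )
-- ===== Notes on version B (the rewrite author's own statement) =====
-- stated objective: idiomatic
-- what changed: Replaces the five sequential .replace() scans per line with one explicit escape table and a single character-by-character pass joining mapped pieces.
import Mathlib
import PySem

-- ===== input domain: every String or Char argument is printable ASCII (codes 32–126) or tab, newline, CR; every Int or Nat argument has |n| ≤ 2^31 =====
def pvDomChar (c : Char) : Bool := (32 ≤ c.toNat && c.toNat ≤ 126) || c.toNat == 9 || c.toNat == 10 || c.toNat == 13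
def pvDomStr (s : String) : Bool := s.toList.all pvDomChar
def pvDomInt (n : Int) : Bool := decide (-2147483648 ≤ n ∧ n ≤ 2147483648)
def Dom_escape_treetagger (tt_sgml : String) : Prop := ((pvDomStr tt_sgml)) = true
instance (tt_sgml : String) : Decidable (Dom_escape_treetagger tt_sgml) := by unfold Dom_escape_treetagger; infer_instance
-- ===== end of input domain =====

-- B replaces the five chained .replace() scans per line with one explicit escape table
-- and a single character-by-character pass (idiomatic; same cost class).

-- ===== PORT A =====
def escape_treetagger (tt_sgml : String) : String :=
  let new_lines :=
    ((PySem.Str.split? tt_sgml "\n").getD []).foldl (fun acc line =>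
      if PySem.Str.startswith line "<" && PySem.Str.endswith line ">" then
        acc ++ [line]
      else
        acc ++ [PySem.Str.replace
                 (PySem.Str.replace
                   (PySem.Str.replace
                     (PySem.Str.replace
                       (PySem.Str.replace line "&" "&amp;")
                       "<" "&lt;")
                     ">" "&gt;")
                   "\"" "&quot;")
                 "'" "&apos;"]) []
  PySem.Str.join "\n" new_lines

-- ===== PORT B =====
def escTable : PySem.Dict Char String :=
  PySem.Dict.mk [('&', "&amp;"), ('<', "&lt;"), ('>', "&gt;"), ('"', "&quot;"), ('\'', "&apos;")]

-- ''.join(_ESCAPES.get(ch, ch) for ch in line)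
def escLine (line : String) : String :=
  String.ofList (line.toList.flatMap (fun c => (escTable.getD c (String.ofList [c])).toList))

def escape_treetagger_alt (tt_sgml : String) : String :=
  PySem.Str.join "\n"
    (((PySem.Str.split? tt_sgml "\n").getD []).map (fun line =>
      if PySem.Str.startswith line "<" && PySem.Str.endswith line ">" then line
      else escLine line))

-- ===== PRECONDITION & SPEC =====
def Spec_escape_treetagger (tt_sgml : String) (out : String) : Prop := out = escape_treetagger_alt tt_sgml
instance (tt_sgml : String) (out : String) : Decidable (Spec_escape_treetagger tt_sgml out) := by unfold Spec_escape_treetagger; infer_instance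

-- ===== CLAIM (what is proved, stated in full; the proofs are below) =====
def Claim_equal_escape_treetagger : Prop := ∀ (tt_sgml : String), Dom_escape_treetagger tt_sgml → Spec_escape_treetagger tt_sgml (escape_treetagger tt_sgml)

-- ===== LEMMAS AND PROOFS =====

-- single-character replace is a flatMap over the characters
theorem replace_go_single (a : Char) (new : List Char) :
    ∀ (l : List Char) (fuel : Nat) (acc : List Char), l.length ≤ fuel →
      PySem.Chars.replace.go [a] new fuel l acc
        = acc.reverse ++ l.flatMap (fun c => if c == a then new else [c]) := by
  intro l
  induction l with
  | nil =>
      intro fuel acc _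
      cases fuel <;> simp [PySem.Chars.replace.go]
  | cons c t ih =>
      intro fuel acc hle
      cases fuel with
      | zero => simp at hle
      | succ fuel =>
        have hle' : t.length ≤ fuel := by simpa using hle
        by_cases h : c = a
        · subst h
          have hpre : List.isPrefixOf [c] (c :: t) = true := by
            simp [List.isPrefixOf]
          rw [PySem.Chars.replace.go]
          simp only [hpre, if_true]
          have hdrop : List.drop [c].length (c :: t) = t := rfl
          rw [hdrop, ih _ _ hle']
          simp
        · have hpre : List.isPrefixOf [a] (c :: t) = false := by
            simp [List.isPrefixOf, h]
            exact fun h' => absurd h'.symm h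
          rw [PySem.Chars.replace.go]
          simp only [hpre, Bool.false_eq_true, if_false]
          rw [ih _ _ hle']
          simp [h]

theorem replace_single (s : List Char) (a : Char) (new : List Char) :
    PySem.Chars.replace s [a] new = s.flatMap (fun c => if c == a then new else [c]) := by
  rw [PySem.Chars.replace]
  simp [replace_go_single a new s (s.length) [] (le_refl _)]

-- the per-character action of the escape table
def escCharB (c : Char) : List Char :=
  ((escTable.getD c (String.ofList [c])).toList)

theorem escLine_eq (line : String) :
    (escLine line).toList = line.toList.flatMap escCharB := by
  simp only [escLine, String.toList_ofList]
  rfl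

-- the composite of the five single-character replaces, per character
theorem chain_eq_escCharB (cs : List Char) :
    (((((cs.flatMap (fun c => if c == '&' then "&amp;".toList else [c])).flatMap
        (fun c => if c == '<' then "&lt;".toList else [c])).flatMap
        (fun c => if c == '>' then "&gt;".toList else [c])).flatMap
        (fun c => if c == '"' then "&quot;".toList else [c])).flatMap
        (fun c => if c == '\'' then "&apos;".toList else [c]))
      = cs.flatMap escCharB := by
  simp only [List.flatMap_assoc]
  apply List.flatMap_congr
  intro c _
  by_cases h1 : c = '&'
  · subst h1; decide
  by_cases h2 : c = '<'
  · subst h2; decide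
  by_cases h3 : c = '>'
  · subst h3; decide
  by_cases h4 : c = '"'
  · subst h4; decide
  by_cases h5 : c = '\''
  · subst h5; decide
  have r1 : ('&' == c) = false := by simp; exact fun hh => h1 hh.symm
  have r2 : ('<' == c) = false := by simp; exact fun hh => h2 hh.symm
  have r3 : ('>' == c) = false := by simp; exact fun hh => h3 hh.symm
  have r4 : ('"' == c) = false := by simp; exact fun hh => h4 hh.symm
  have r5 : ('\'' == c) = false := by simp; exact fun hh => h5 hh.symm
  simp [h1, h2, h3, h4, h5, r1, r2, r3, r4, r5, escCharB, escTable,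
    PySem.Dict.getD, PySem.Dict.get?, List.find?, String.toList_ofList]

-- A's escaped line equals B's escaped line
theorem replace_chain_eq (line : String) :
    PySem.Str.replace
      (PySem.Str.replace
        (PySem.Str.replace
          (PySem.Str.replace
            (PySem.Str.replace line "&" "&amp;")
            "<" "&lt;")
          ">" "&gt;")
        "\"" "&quot;")
      "'" "&apos;" = escLine line := by
  apply String.ext  -- equality of toList
  simp only [PySem.Str.toList_replace, escLine_eq]
  simp only [show "&".toList = ['&'] from rfl, show "<".toList = ['<'] from rfl,
    show ">".toList = ['>'] from rfl, show "\"".toList = ['"'] from rfl,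
    show "'".toList = ['\''] from rfl]
  rw [replace_single, replace_single, replace_single, replace_single, replace_single]
  exact chain_eq_escCharB line.toList

-- an 'if p(x): out.append(x) else: out.append(g(x))' loop builds a map
theorem foldl_if_singleton {α β : Type} (p : α → Bool) (f g : α → β) (l : List α) (acc : List β) :
    l.foldl (fun acc x => if p x then acc ++ [f x] else acc ++ [g x]) acc
      = acc ++ l.map (fun x => if p x then f x else g x) := by
  induction l generalizing acc with
  | nil => simp
  | cons x t ih =>
      simp only [List.foldl_cons, List.map_cons]
      split_ifs with h <;> rw [ih] <;> simp

-- ===== VERDICT (by name: the statement is the Claim_ definition above) =====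
theorem escape_treetagger_spec : Claim_equal_escape_treetagger := by
  intro tt _
  show _ = _
  unfold escape_treetagger escape_treetagger_alt
  rw [foldl_if_singleton]
  simp only [List.nil_append]
  refine congrArg _ (List.map_congr_left ?_)
  intro line _
  split_ifs with h
  · rfl
  · exact replace_chain_eq line
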